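-- pv_equiv track=rewrite | github.com/Nannanpeng/2019_christos_performance_pay | utils/math/__init__.py | idx_to_tuple
-- ===== SOURCE A (Python) =====
-- import functools
-- from operator import mul
--
-- def list_prod(lst):
--     return functools.reduce(mul,lst)
--
-- def idx_to_tuple(idx,shape):
--     lst = []
--     ndim = len(shape)
--     for i in range(ndim):
--         step = list_prod(shape[i+1:ndim]) if i < (ndim-1) else 1
--         val = idx // step
--         idx = idx - val*step
--         lst.append(val)
--
--     return tuple(lst)
-- ===== SOURCE B (Python) =====
-- def idx_to_tuple(idx, shape):
--     # one backward pass of running products, then one forward divmod pass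
--     steps = []
--     acc = 1
--     for s in reversed(shape):
--         steps.append(acc)
--         acc *= s
--     out = []
--     for step in reversed(steps):
--         val, idx = divmod(idx, step)
--         out.append(val)
--     return tuple(out)
-- ===== Notes on version B (the rewrite author's own statement) =====
-- stated objective: faster
-- what changed: Replaces the per-coordinate reduce over a fresh slice (quadratic) with one backward running-product pass that precomputes all suffix strides, then a single forward divmod pass.
import Mathlib
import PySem

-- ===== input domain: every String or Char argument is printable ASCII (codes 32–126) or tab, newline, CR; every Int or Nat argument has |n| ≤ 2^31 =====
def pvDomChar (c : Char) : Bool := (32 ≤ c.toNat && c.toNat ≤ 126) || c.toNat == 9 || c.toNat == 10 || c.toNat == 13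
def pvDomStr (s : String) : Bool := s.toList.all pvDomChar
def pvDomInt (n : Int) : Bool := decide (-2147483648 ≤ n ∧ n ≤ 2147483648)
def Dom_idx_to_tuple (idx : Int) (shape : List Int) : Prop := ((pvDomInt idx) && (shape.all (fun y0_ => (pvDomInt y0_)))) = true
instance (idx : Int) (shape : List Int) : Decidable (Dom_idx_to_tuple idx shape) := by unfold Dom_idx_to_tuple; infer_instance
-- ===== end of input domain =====

-- B precomputes all suffix strides in one backward running-product pass, then does one forward divmod pass (asymptotically fewer multiplications than A's per-coordinate reduce over a fresh slice).

-- ===== PORT A =====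
-- functools.reduce(mul, lst); A only calls it on nonempty slices (the [] case is unreachable there: reduce raises on [])
def listProdA : List Int → Int
  | [] => 0
  | x :: xs => xs.foldl (· * ·) x

def idx_to_tuple (idx : Int) (shape : List Int) : List Int :=
  let ndim : Int := shape.length
  let st := (PySem.List.pyRange 0 ndim 1).foldl
    (fun (st : List Int × Int) i =>
      let step := if i < ndim - 1 then listProdA (PySem.List.slice shape (some (i + 1)) (some ndim)) else 1
      let val := PySem.Int.floordiv st.2 step
      (st.1 ++ [val], st.2 - val * step))
    ([], idx)
  st.1

-- ===== PORT B =====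
def idx_to_tuple_alt (idx : Int) (shape : List Int) : List Int :=
  let p := shape.reverse.foldl (fun (st : List Int × Int) s => (st.1 ++ [st.2], st.2 * s)) ([], 1)
  let r := p.1.reverse.foldl
    (fun (st : List Int × Int) step =>
      (st.1 ++ [PySem.Int.floordiv st.2 step], PySem.Int.mod st.2 step))
    ([], idx)
  r.1

-- ===== PRECONDITION & SPEC =====
-- Pre_ excludes exactly the inputs where Python A raises ZeroDivisionError: a 0 among shape[1:] makes some suffix-product stride 0.
def Pre_idx_to_tuple (idx : Int) (shape : List Int) : Prop := ∀ s ∈ shape.drop 1, s ≠ 0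
instance (idx : Int) (shape : List Int) : Decidable (Pre_idx_to_tuple idx shape) := by unfold Pre_idx_to_tuple; infer_instance
def pvWitness_idx_to_tuple : Int × List Int := (17, [2, 3, 4])

def Spec_idx_to_tuple (idx : Int) (shape : List Int) (out : List Int) : Prop := out = idx_to_tuple_alt idx shape
instance (idx : Int) (shape : List Int) (out : List Int) : Decidable (Spec_idx_to_tuple idx shape out) := by unfold Spec_idx_to_tuple; infer_instance

-- ===== CLAIM (what is proved, stated in full; the proofs are below) =====
def Claim_equal_idx_to_tuple : Prop := ∀ (idx : Int) (shape : List Int), Dom_idx_to_tuple idx shape → Pre_idx_to_tuple idx shape → Spec_idx_to_tuple idx shape (idx_to_tuple idx shape)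

-- ===== LEMMAS AND PROOFS =====

-- product of a list, from the right
def prodR : List Int → Int
  | [] => 1
  | x :: xs => x * prodR xs

-- the common mathematical shape of both loops
def go : Int → List Int → List Int
  | _, [] => []
  | idx, _ :: rest =>
    let step := prodR rest
    PySem.Int.floordiv idx step :: go (PySem.Int.mod idx step) rest

-- the suffix-product strides, per coordinate
def tailProds : List Int → List Int
  | [] => []
  | _ :: rest => prodR rest :: tailProds rest

theorem listProdA_eq_prodR_aux (l : List Int) : ∀ a : Int, l.foldl (· * ·) a = a * prodR l := by
  induction l with
  | nil => intro a; simp [prodR]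
  | cons y ys ih => intro a; simp [List.foldl, prodR, ih (a * y)]; ring

theorem listProdA_eq_prodR (x : Int) (xs : List Int) : listProdA (x :: xs) = prodR (x :: xs) := by
  simp [listProdA, prodR, listProdA_eq_prodR_aux]

theorem sub_floordiv_mul (a b : Int) : a - PySem.Int.floordiv a b * b = PySem.Int.mod a b := by
  have h := PySem.Int.floordiv_mul_add_mod a b
  omega

theorem A_loop (shape : List Int) :
    ∀ (k j : Nat), j + k = shape.length →
    ∀ (acc : List Int) (idx : Int),
      ((PySem.List.pyRange (j : Int) (shape.length : Int) 1).foldl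
        (fun (st : List Int × Int) i =>
          let step := if i < (shape.length : Int) - 1 then
              listProdA (PySem.List.slice shape (some (i + 1)) (some (shape.length : Int))) else 1
          let val := PySem.Int.floordiv st.2 step
          (st.1 ++ [val], st.2 - val * step)) (acc, idx)).1
      = acc ++ go idx (shape.drop j) := by
  intro k
  induction k with
  | zero =>
    intro j hj acc idx
    have hjn : j = shape.length := by omega
    have hempty : PySem.List.pyRange (j : Int) (shape.length : Int) 1 = [] := by
      simp [PySem.List.pyRange, hjn]
    rw [hempty]
    simp [hjn, go]
  | succ k ih =>
    intro j hj acc idx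
    have hjlt : (j : Int) < (shape.length : Int) := by
      have : j < shape.length := by omega
      exact_mod_cast this
    have hlt : j < shape.length := by omega
    have hdropj := List.drop_eq_getElem_cons hlt
    have hstep : (if (j : Int) < (shape.length : Int) - 1 then
        listProdA (PySem.List.slice shape (some ((j : Int) + 1)) (some (shape.length : Int))) else 1)
        = prodR (shape.drop (j + 1)) := by
      by_cases hc : j + 1 < shape.length
      · have hcond : (j : Int) < (shape.length : Int) - 1 := by omega
        rw [if_pos hcond]
        have hcast : ((j : Int) + 1) = ((j + 1 : Nat) : Int) := by push_cast; ring
        rw [hcast, PySem.List.slice_natCast]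
        have htake : (shape.drop (j + 1)).take (shape.length - (j + 1)) = shape.drop (j + 1) := by
          apply List.take_of_length_le; simp
        rw [htake]
        obtain ⟨x, xs, hx⟩ : ∃ x xs, shape.drop (j + 1) = x :: xs := by
          cases hdx : shape.drop (j + 1) with
          | nil => exfalso; have := List.length_drop (l := shape) (i := j + 1); rw [hdx] at this; simp at this; omega
          | cons x xs => exact ⟨x, xs, rfl⟩
        rw [hx, listProdA_eq_prodR]
      · have hj1 : j + 1 = shape.length := by omega
        rw [if_neg (by omega)]
        rw [hj1, List.drop_length]
        rfl
    rw [PySem.List.pyRange_one_cons hjlt]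
    simp only [List.foldl_cons]
    rw [hstep, sub_floordiv_mul]
    have ih' := ih (j + 1) (by omega) (acc ++ [PySem.Int.floordiv idx (prodR (shape.drop (j + 1)))]) (PySem.Int.mod idx (prodR (shape.drop (j + 1))))
    simp only [] at ih'
    rw [show ((j : Int) + 1) = ((j + 1 : Nat) : Int) from by push_cast; ring]
    rw [ih']
    rw [hdropj]
    simp [go]

theorem A_eq_go (idx : Int) (shape : List Int) : idx_to_tuple idx shape = go idx shape := by
  unfold idx_to_tuple
  have h := A_loop shape shape.length 0 (by omega) [] idx
  simpa using h

theorem B_steps (shape : List Int) :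
    (shape.reverse.foldl (fun (st : List Int × Int) s => (st.1 ++ [st.2], st.2 * s)) ([], 1)).1.reverse
        = tailProds shape ∧
    (shape.reverse.foldl (fun (st : List Int × Int) s => (st.1 ++ [st.2], st.2 * s)) ([], 1)).2
        = prodR shape := by
  induction shape with
  | nil => simp [tailProds, prodR]
  | cons x rest ih =>
    obtain ⟨ih1, ih2⟩ := ih
    rw [List.reverse_cons, List.foldl_append]
    simp only [List.foldl_cons, List.foldl_nil]
    constructor
    · rw [List.reverse_append, ih2, List.reverse_singleton, List.singleton_append, ih1]
      rfl
    · rw [ih2, show prodR (x :: rest) = x * prodR rest from rfl]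
      ring

theorem B_loop (shape : List Int) :
    ∀ (acc : List Int) (idx : Int),
      ((tailProds shape).foldl
        (fun (st : List Int × Int) step =>
          (st.1 ++ [PySem.Int.floordiv st.2 step], PySem.Int.mod st.2 step)) (acc, idx)).1
      = acc ++ go idx shape := by
  induction shape with
  | nil => intro acc idx; simp [tailProds, go]
  | cons x rest ih =>
    intro acc idx
    simp only [tailProds, List.foldl_cons]
    rw [ih]
    simp [go]

theorem B_eq_go (idx : Int) (shape : List Int) : idx_to_tuple_alt idx shape = go idx shape := by
  unfold idx_to_tuple_alt
  have h := B_steps shape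
  simp only []
  rw [h.1, B_loop]
  simp

-- ===== VERDICT (by name: the statement is the Claim_ definition above) =====
theorem idx_to_tuple_spec : Claim_equal_idx_to_tuple := by
  intro idx shape _ _
  unfold Spec_idx_to_tuple
  rw [A_eq_go, B_eq_go]
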